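-- pv_equiv track=rewrite | github.com/Radium-bit/BlindWatermarkGUI | watermark/dataShielder2.py | interleave_bitstream
-- ===== SOURCE A (Python) =====
-- def interleave_bitstream(bitstream, depth=8):
--     """对比特流进行交织"""
--     rows = [bitstream[i::depth] for i in range(depth)]
--     interleaved = []
--     for i in range(max(len(row) for row in rows)):
--         for row in rows:
--             if i < len(row):
--                 interleaved.append(row[i])
--     return interleaved
-- ===== SOURCE B (Python) =====
-- def interleave_bitstream(bitstream, depth=8):
--     """对比特流进行交织
--
--     Splitting into stride-`depth` rows and reading them back column-major
--     visits index i*depth + r in strictly increasing order, so the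
--     'interleaving' permutation is the identity: just copy the stream.
--     """
--     if depth <= 0:
--         raise ValueError("depth must be positive")
--     return list(bitstream)
-- ===== Notes on version B (the rewrite author's own statement) =====
-- stated objective: faster
-- what changed: A builds depth stride-sliced rows and re-reads them column-major; since row r element i is bitstream[i*depth+r], that traversal is the identity permutation, so B just returns a copy of the list (still raising ValueError for depth <= 0, like A).
import Mathlib
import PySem

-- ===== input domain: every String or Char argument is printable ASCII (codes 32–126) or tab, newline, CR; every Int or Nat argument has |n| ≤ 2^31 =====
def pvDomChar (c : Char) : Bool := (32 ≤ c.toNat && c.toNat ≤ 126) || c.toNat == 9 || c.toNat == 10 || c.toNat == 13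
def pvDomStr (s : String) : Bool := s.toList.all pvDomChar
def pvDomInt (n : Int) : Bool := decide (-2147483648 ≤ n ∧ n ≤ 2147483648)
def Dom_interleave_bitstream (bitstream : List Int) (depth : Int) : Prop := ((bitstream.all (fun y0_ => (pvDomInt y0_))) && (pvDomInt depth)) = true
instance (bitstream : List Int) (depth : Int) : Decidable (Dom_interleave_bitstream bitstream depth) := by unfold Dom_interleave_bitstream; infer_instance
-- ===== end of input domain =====

-- B: A's stride-slice/column-major pass visits indices in increasing order (identity permutation), so B simply copies the list (raising like A for depth ≤ 0); Pre_ excludes depth ≤ 0, where both Pythons raise ValueError.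


-- ===== PORT A =====
def interleave_bitstream (bitstream : List Int) (depth : Int) : List Int :=
  -- rows = [bitstream[i::depth] for i in range(depth)]   (slice? is none only for step 0, outside Pre_)
  let rows := (PySem.List.pyRange 0 depth 1).map
      (fun i => (PySem.List.slice? bitstream (some i) none depth).getD [])
  -- m = max(len(row) for row in rows)   (max() raises on the empty rows list, i.e. depth ≤ 0, outside Pre_)
  let m := (PySem.List.max? (rows.map (fun row => (row.length : Int))) id).getD 0
  (PySem.List.pyRange 0 m 1).foldl
    (fun interleaved i =>
      rows.foldl
        (fun interleaved row =>
          if i < (row.length : Int) then interleaved ++ [PySem.List.pyGetD row i 0]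
          else interleaved)
        interleaved)
    []

-- ===== PORT B =====
def interleave_bitstream_alt (bitstream : List Int) (depth : Int) : List Int :=
  -- 'if depth <= 0: raise ValueError' — the raising branch is outside Pre_; then: return list(bitstream)
  bitstream

-- ===== PRECONDITION & SPEC =====
-- Pre_ excludes exactly depth ≤ 0, where both Pythons raise ValueError (A: slice step 0 / max() of an empty sequence; B: an explicit raise).
def Pre_interleave_bitstream (bitstream : List Int) (depth : Int) : Prop := 1 ≤ depth
instance (bitstream : List Int) (depth : Int) : Decidable (Pre_interleave_bitstream bitstream depth) := by unfold Pre_interleave_bitstream; infer_instance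
def pvWitness_interleave_bitstream : List Int × Int := ([1, 0, 1, 1, 0], 2)

def Spec_interleave_bitstream (bitstream : List Int) (depth : Int) (out : List Int) : Prop := out = interleave_bitstream_alt bitstream depth
instance (bitstream : List Int) (depth : Int) (out : List Int) : Decidable (Spec_interleave_bitstream bitstream depth out) := by unfold Spec_interleave_bitstream; infer_instance

-- ===== CLAIM (what is proved, stated in full; the proofs are below) =====
def Claim_equal_interleave_bitstream : Prop := ∀ (bitstream : List Int) (depth : Int), Dom_interleave_bitstream bitstream depth → Pre_interleave_bitstream bitstream depth → Spec_interleave_bitstream bitstream depth (interleave_bitstream bitstream depth)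

-- ===== LEMMAS AND PROOFS =====

-- row r of A: ceil((|xs|-r)/d) elements, the k-th being xs[r + d*k]
def pvRow (xs : List Int) (dN rN : Nat) : List Int :=
  (List.range ((xs.length - rN + dN - 1) / dN)).map (fun k => xs.getD (rN + dN * k) 0)

-- xs[r::d] for 0 ≤ r, 1 ≤ d is pvRow
lemma slice_stride_eq (xs : List Int) (dN rN : Nat) (hd : 1 ≤ dN) :
    PySem.List.slice? xs (some (rN : Int)) none (dN : Int) = some (pvRow xs dN rN) := by
  unfold PySem.List.slice? PySem.List.sliceIndices
  have h0 : ¬((dN : Int) = 0) := by omega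
  have h1 : ¬((dN : Int) < 0) := by omega
  have h2 : ¬((rN : Int) < 0) := by omega
  have hpos : (0 : Int) < (dN : Int) := by omega
  simp only [h0, h1, h2, if_false, if_pos hpos]
  rcases Nat.lt_or_ge rN xs.length with hrn | hrn
  · have hmin : min (rN : Int) (xs.length : Int) = (rN : Int) := by omega
    have hlt : (rN : Int) < (xs.length : Int) := by exact_mod_cast hrn
    rw [hmin, if_pos hlt]
    have hcast : ((xs.length : Int) - rN + dN - 1) = ((xs.length - rN + dN - 1 : Nat) : Int) := by
      omega
    rw [hcast, ← Int.natCast_div, Int.toNat_natCast]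
    have hmem : ∀ x ∈ List.range ((xs.length - rN + dN - 1) / dN),
        xs[((rN : Int) + (dN : Int) * (x : Int)).toNat]? = some (xs.getD (rN + dN * x) 0) := by
      intro x hx
      rw [List.mem_range] at hx
      have hb : dN * (x + 1) ≤ dN * ((xs.length - rN + dN - 1) / dN) :=
        Nat.mul_le_mul_left dN hx
      have hb2 : dN * ((xs.length - rN + dN - 1) / dN) ≤ xs.length - rN + dN - 1 :=
        Nat.mul_div_le _ _
      have hidx : rN + dN * x < xs.length := by
        have hstep : dN * (x + 1) = dN * x + dN := by ring
        omega
      have hcast2 : ((rN : Int) + (dN : Int) * (x : Int)).toNat = rN + dN * x := by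
        omega
      rw [hcast2, List.getElem?_eq_getElem hidx, List.getD_eq_getElem _ _ hidx]
    rw [List.filterMap_congr hmem]
    simp [pvRow]
  · have hmin : min (rN : Int) (xs.length : Int) = (xs.length : Int) := by omega
    rw [hmin, if_neg (lt_irrefl _)]
    have hz : xs.length - rN = 0 := by omega
    simp [pvRow, hz, Nat.div_eq_of_lt (show dN - 1 < dN by omega)]

-- i < ceil(a/d) iff d*i < a
lemma lt_cld_iff (i a d : Nat) (hd : 1 ≤ d) : i < (a + d - 1) / d ↔ d * i < a := by
  have h1 : i < (a + d - 1) / d ↔ i + 1 ≤ (a + d - 1) / d := Iff.rfl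
  rw [h1, Nat.le_div_iff_mul_le (by omega)]
  have h2 : (i + 1) * d = d * i + d := by ring
  omega

-- a downward-closed filter of a range is a range
lemma filter_range_lt (a b : Nat) :
    (List.range a).filter (fun r => decide (r < b)) = List.range (min a b) := by
  induction a with
  | zero => simp
  | succ a ih =>
    rw [List.range_succ, List.filter_append, ih]
    by_cases h : a < b
    · have hab : min a b = a := by omega
      have hmin : min (a + 1) b = a + 1 := by omega
      simp [h, hab, List.range_succ]
    · have hmin : min (a + 1) b = min a b := by omega
      simp [h, hmin]

-- Prop-guarded append loop = filter-then-map
lemma foldl_app_ite {α β : Type} (p : β → Prop) [DecidablePred p] (f : β → α)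
    (l : List β) (acc : List α) :
    l.foldl (fun a x => if p x then a ++ [f x] else a) acc
      = acc ++ (l.filter (fun x => decide (p x))).map f := by
  induction l generalizing acc with
  | nil => simp
  | cons y t ih =>
    by_cases h : p y <;> simp [h, ih, List.append_assoc]

-- column i of A's inner loop is one d-sized chunk of xs
lemma chunk_eq (xs : List Int) (dN : Nat) (hd : 1 ≤ dN) (iN : Nat) :
    (((List.range dN).map (pvRow xs dN)).filter
        (fun row => decide ((iN : Int) < (row.length : Int)))).map
      (fun row => PySem.List.pyGetD row (iN : Int) 0)
      = (xs.drop (iN * dN)).take dN := by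
  rw [List.filter_map, List.map_map]
  have hpred : ∀ r ∈ List.range dN,
      ((fun row => decide ((iN : Int) < (row.length : Int))) ∘ pvRow xs dN) r
        = decide (r < xs.length - dN * iN) := by
    intro r _
    simp only [Function.comp, pvRow, List.length_map, List.length_range]
    rw [decide_eq_decide]
    rw [show ((iN : Int) < ((xs.length - r + dN - 1) / dN : Nat)) ↔ iN < (xs.length - r + dN - 1) / dN from by exact_mod_cast Iff.rfl,
        lt_cld_iff _ _ _ hd]
    omega
  rw [List.filter_congr hpred, filter_range_lt]
  apply List.ext_getElem
  · simp [Nat.mul_comm iN dN]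
  · intro j h1 h2
    simp only [List.getElem_map, List.getElem_range, Function.comp]
    have hjlen : j < min dN (xs.length - dN * iN) := by simpa using h1
    have hcnt : iN < (xs.length - j + dN - 1) / dN := by
      rw [lt_cld_iff _ _ _ hd]; omega
    have hidx : j + dN * iN < xs.length := by omega
    rw [PySem.List.pyGetD_natCast]
    simp only [pvRow]
    rw [List.getD_eq_getElem _ _ (by simpa using hcnt)]
    simp only [List.getElem_map, List.getElem_range]
    rw [List.getElem_take, List.getElem_drop]
    rw [List.getD_eq_getElem _ _ hidx]
    exact getElem_congr rfl (by ring) (by omega)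

-- concatenating the chunks gives a prefix of xs
lemma flatMap_chunks (xs : List Int) (dN : Nat) (mN : Nat) :
    (List.range mN).flatMap (fun iN => (xs.drop (iN * dN)).take dN)
      = xs.take (mN * dN) := by
  induction mN with
  | zero => simp
  | succ m ih =>
    rw [List.range_succ, List.flatMap_append, ih]
    simp [Nat.succ_mul, List.take_add]

lemma ceil_mul_ge (n dN : Nat) (hd : 1 ≤ dN) : n ≤ (n + dN - 1) / dN * dN := by
  rcases Nat.eq_zero_or_pos n with h | h
  · simp [h]
  · have h' : n + dN - 1 = (n - 1) + dN := by omega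
    rw [h', Nat.add_div_right _ (by omega), Nat.add_mul, one_mul]
    have h1 := Nat.div_add_mod (n - 1) dN
    have h2 := Nat.mod_lt (n - 1) (show 0 < dN by omega)
    have h3 : (n - 1) / dN * dN = dN * ((n - 1) / dN) := Nat.mul_comm _ _
    omega

-- max? of a nonempty list is some member
lemma max?_mem_int (l : List Int) (h : l ≠ []) :
    ∃ v, PySem.List.max? l id = some v ∧ v ∈ l := by
  cases l with
  | nil => exact absurd rfl h
  | cons x t =>
    unfold PySem.List.max?
    simp only [List.foldl_cons]
    induction t generalizing x with
    | nil => exact ⟨x, rfl, by simp⟩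
    | cons y t ih =>
      simp only [List.foldl_cons]
      by_cases hxy : x < y
      · obtain ⟨v, hv, hm⟩ := ih y (by simp)
        refine ⟨v, ?_, ?_⟩
        · simpa [hxy] using hv
        · simp at hm ⊢; tauto
      · obtain ⟨v, hv, hm⟩ := ih x (by simp)
        refine ⟨v, ?_, ?_⟩
        · simpa [hxy] using hv
        · simp at hm ⊢; tauto

-- the whole of port A is the identity for a positive Nat depth
lemma portA_id (xs : List Int) (dN : Nat) (hd : 1 ≤ dN) :
    interleave_bitstream xs (dN : Int) = xs := by
  unfold interleave_bitstream
  simp only []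
  -- rewrite the rows
  have hrows : (PySem.List.pyRange 0 (dN : Int) 1).map
      (fun i => (PySem.List.slice? xs (some i) none (dN : Int)).getD [])
      = (List.range dN).map (pvRow xs dN) := by
    rw [PySem.List.pyRange_one]
    rw [List.map_map]
    refine List.map_congr_left ?_
    intro k hk
    simp only [Function.comp]
    rw [show ((0 : Int) + (k : Int)) = (k : Int) by ring, slice_stride_eq xs dN k hd]
    rfl
  rw [hrows]
  have hne : (List.range dN).map (pvRow xs dN) ≠ [] := by
    simp [List.range_eq_nil]; omega
  have hlne : ((List.range dN).map (pvRow xs dN)).map (fun row => (row.length : Int)) ≠ [] := by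
    simpa using hne
  obtain ⟨v, hv, hvmem⟩ := max?_mem_int _ hlne
  rw [hv, Option.getD_some]
  have hv0 : 0 ≤ v := by
    obtain ⟨row, _, hrow⟩ := List.mem_map.mp hvmem
    omega
  have hmax := PySem.List.max?_isMax hv
  have hmem0 : ((pvRow xs dN 0).length : Int)
      ∈ ((List.range dN).map (pvRow xs dN)).map (fun row => (row.length : Int)) := by
    exact List.mem_map_of_mem (List.mem_map_of_mem (List.mem_range.mpr (by omega)))
  have hbound : ((xs.length + dN - 1) / dN : Nat) ≤ v := by
    have := hmax _ hmem0
    simp only [pvRow, List.length_map, List.length_range, Nat.sub_zero, id_eq] at this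
    omega
  have hveq : v = ((v.toNat : Nat) : Int) := by omega
  rw [hveq, PySem.List.pyRange_one]
  rw [show ((v.toNat : Int) - 0).toNat = v.toNat by omega]
  rw [List.foldl_map]
  have hstep : ∀ (acc : List Int) (kN : Nat), kN ∈ List.range v.toNat →
      ((List.range dN).map (pvRow xs dN)).foldl
        (fun acc row => if ((0 : Int) + (kN : Int)) < (row.length : Int)
          then acc ++ [PySem.List.pyGetD row ((0 : Int) + (kN : Int)) 0] else acc) acc
      = acc ++ (xs.drop (kN * dN)).take dN := by
    intro acc kN _
    simp only [zero_add]
    rw [foldl_app_ite (fun row : List Int => (kN : Int) < (row.length : Int))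
        (fun row => PySem.List.pyGetD row (kN : Int) 0)]
    rw [chunk_eq xs dN hd kN]
  rw [PySem.List.foldl_congr_mem (List.range v.toNat) _
      (fun acc kN => acc ++ (xs.drop (kN * dN)).take dN) [] hstep]
  rw [PySem.List.foldl_append_eq_flatMap]
  rw [flatMap_chunks]
  simp only [List.nil_append]
  apply List.take_of_length_le
  have h1 : (xs.length + dN - 1) / dN ≤ v.toNat := by omega
  have h2 := ceil_mul_ge xs.length dN hd
  calc xs.length ≤ (xs.length + dN - 1) / dN * dN := h2
    _ ≤ v.toNat * dN := Nat.mul_le_mul_right dN h1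

-- ===== VERDICT (by name: the statement is the Claim_ definition above) =====
theorem interleave_bitstream_spec : Claim_equal_interleave_bitstream := by
  intro bitstream depth _ hPre
  unfold Spec_interleave_bitstream interleave_bitstream_alt
  have hdep : depth = ((depth.toNat : Nat) : Int) := (Int.toNat_of_nonneg (by
    unfold Pre_interleave_bitstream at hPre; omega)).symm
  rw [hdep]
  exact portA_id bitstream depth.toNat (by unfold Pre_interleave_bitstream at hPre; omega)
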